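-- pv_equiv track=rewrite | github.com/SerhiiMiroshnychenko/ScientificCalculations | PaperS/Paper4/feature_greedy_vs_importance.py | identify_cyclical_features
-- ===== SOURCE A (Python) =====
-- def identify_cyclical_features(feature_names):
--     cyclical_pairs = {}
--     sin_features = [f for f in feature_names if f.endswith('_sin')]
--     for sin_feature in sin_features:
--         base_name = sin_feature[:-4]
--         cos_feature = f"{base_name}_cos"
--         if cos_feature in feature_names:
--             cyclical_pairs[base_name] = [sin_feature, cos_feature]
--     return cyclical_pairs
-- ===== SOURCE B (Python) =====
-- def identify_cyclical_features(feature_names):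
--     # Online single pass: each pair is committed the moment its second half arrives.
--     pairs = {}      # base -> [sin_name, cos_name], or None while the cos half is still missing
--     cos_seen = set()
--     for name in feature_names:
--         if name.endswith('_sin'):
--             base = name[:-4]
--             if base not in pairs:
--                 pairs[base] = [name, base + '_cos'] if base in cos_seen else None
--         elif name.endswith('_cos'):
--             base = name[:-4]
--             cos_seen.add(base)
--             if base in pairs and pairs[base] is None:
--                 pairs[base] = [base + '_sin', name]
--     return {b: v for b, v in pairs.items() if v is not None}
-- ===== Notes on version B (the rewrite author's own statement) =====
-- stated objective: alternative
-- what changed: A first filters out all '_sin' names and then, for each, probes the whole input list for the matching '_cos' name (staged filter + quadratic membership scan); B is an online single pass that keeps per-base pair state (pending until the second half is seen) and commits each pair at the moment its '_cos' (or delayed '_sin') half arrives, followed by a filter of completed entries.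
import Mathlib
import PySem

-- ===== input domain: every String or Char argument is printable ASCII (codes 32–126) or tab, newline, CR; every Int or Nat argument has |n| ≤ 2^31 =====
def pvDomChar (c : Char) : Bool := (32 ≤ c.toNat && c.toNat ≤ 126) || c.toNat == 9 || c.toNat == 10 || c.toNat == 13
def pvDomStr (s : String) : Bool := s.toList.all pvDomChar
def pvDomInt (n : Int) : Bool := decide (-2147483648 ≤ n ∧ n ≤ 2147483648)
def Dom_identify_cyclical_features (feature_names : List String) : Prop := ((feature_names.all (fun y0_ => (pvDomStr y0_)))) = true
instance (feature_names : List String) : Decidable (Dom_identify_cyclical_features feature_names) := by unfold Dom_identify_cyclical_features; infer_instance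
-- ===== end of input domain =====

-- B replaces A's staged filter-then-membership-probe by an online single pass that keeps
-- per-base pair state (pending until the second half arrives) and commits each pair the
-- moment it is completed (objective: alternative).

-- ===== PORT A =====
def identify_cyclical_features (feature_names : List String) : List (String × List String) :=
  let sin_features := feature_names.filter (fun f => PySem.Str.endswith f "_sin")
  (sin_features.foldl (fun (cyclical_pairs : PySem.Dict String (List String)) sin_feature =>
      let base_name := PySem.Str.slice sin_feature none (some (-4))
      let cos_feature := base_name ++ "_cos"
      if feature_names.contains cos_feature then
        cyclical_pairs.insert base_name [sin_feature, cos_feature]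
      else cyclical_pairs) PySem.Dict.empty).items

-- ===== PORT B =====
-- the loop body of Source B's single pass (state: pairs dict, cos_seen set)
def pvStepB (st : PySem.Dict String (Option (List String)) × PySem.Set String) (name : String) :
    PySem.Dict String (Option (List String)) × PySem.Set String :=
  if PySem.Str.endswith name "_sin" then
    let base := PySem.Str.slice name none (some (-4))
    if st.1.contains base then st
    else (st.1.insert base (if PySem.Set.contains st.2 base then some [name, base ++ "_cos"] else none), st.2)
  else if PySem.Str.endswith name "_cos" then
    let base := PySem.Str.slice name none (some (-4))
    let cos_seen := PySem.Set.add st.2 base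
    if st.1.get? base = some none then (st.1.insert base (some [base ++ "_sin", name]), cos_seen)
    else (st.1, cos_seen)
  else st

def identify_cyclical_features_alt (feature_names : List String) : List (String × List String) :=
  let st := feature_names.foldl pvStepB (PySem.Dict.empty, PySem.Set.empty)
  -- {b: v for b, v in pairs.items() if v is not None}
  (st.1.items.foldl
    (fun (d : PySem.Dict String (List String)) bv =>
      match bv.2 with
      | some v => d.insert bv.1 v
      | none => d) PySem.Dict.empty).items

-- ===== PRECONDITION & SPEC =====
def Spec_identify_cyclical_features (feature_names : List String) (out : List (String × List String)) : Prop := out = identify_cyclical_features_alt feature_names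
instance (feature_names : List String) (out : List (String × List String)) : Decidable (Spec_identify_cyclical_features feature_names out) := by unfold Spec_identify_cyclical_features; infer_instance

-- ===== CLAIM (what is proved, stated in full; the proofs are below) =====
def Claim_equal_identify_cyclical_features : Prop := ∀ (feature_names : List String), Dom_identify_cyclical_features feature_names → Spec_identify_cyclical_features feature_names (identify_cyclical_features feature_names)

-- ===== LEMMAS AND PROOFS =====

-- strip s = s[:-4]
def pvStrip (s : String) : String := PySem.Str.slice s none (some (-4))

-- the pair emitted for a base
def pvPair (b : String) : List String := [b ++ "_sin", b ++ "_cos"]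

-- the value Source B's pairs dict holds for a sin base, given the cos bases seen
def pvVf (cs : PySem.Set String) (b : String) : Option (List String) :=
  if PySem.Set.contains cs b then some (pvPair b) else none

-- a dict built by inserting each key of bs with value V
def pvDictOf {β : Type} (bs : List String) (V : String → β) : PySem.Dict String β :=
  bs.foldl (fun d b => d.insert b (V b)) PySem.Dict.empty

-- bases of the sin / cos features of a list (in Source B's elif order)
def pvSinBases (l : List String) : List String :=
  (l.filter (fun f => PySem.Str.endswith f "_sin")).map pvStrip
def pvCosBases (l : List String) : List String :=
  (l.filter (fun f => !PySem.Str.endswith f "_sin" && PySem.Str.endswith f "_cos")).map pvStrip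

theorem pvStrip_toList (s : String) :
    (pvStrip s).toList = s.toList.take (s.toList.length - 4) := by
  unfold pvStrip
  simp only [PySem.Str.toList_slice, PySem.Chars.slice_eq_listSlice]
  rw [PySem.List.slice_to_neg_ofNat s.toList 4 (by omega)]

theorem str_toList_inj {s t : String} (h : s.toList = t.toList) : s = t := by
  have := congrArg String.ofList h
  simpa using this

theorem pvStrip_append (b s4 : String) (h : s4.toList.length = 4) :
    pvStrip (b ++ s4) = b := by
  apply str_toList_inj
  rw [pvStrip_toList]
  simp [h]

theorem pvEndswith_iff (s p : String) :
    PySem.Str.endswith s p = true ↔ p.toList <:+ s.toList := by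
  rw [PySem.Str.endswith_eq, PySem.Chars.endswith_iff]

theorem pvEndswith_append (b s4 : String) : PySem.Str.endswith (b ++ s4) s4 = true := by
  rw [pvEndswith_iff]
  simp

theorem pvStrip_append_suffix (f s4 : String) (h4 : s4.toList.length = 4)
    (h : PySem.Str.endswith f s4 = true) : pvStrip f ++ s4 = f := by
  rw [pvEndswith_iff] at h
  obtain ⟨t, ht⟩ := h
  apply str_toList_inj
  rw [String.toList_append, pvStrip_toList, ← ht]
  have : (t ++ s4.toList).length - 4 = t.length := by simp [h4]
  rw [this, List.take_left]

theorem pvSuffix_eq_of_length {α : Type} (s1 s2 L : List α) (h1 : s1 <:+ L) (h2 : s2 <:+ L)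
    (hl : s1.length = s2.length) : s1 = s2 := by
  obtain ⟨t1, ht1⟩ := h1
  obtain ⟨t2, ht2⟩ := h2
  have hL := ht1.trans ht2.symm
  have hlen : t1.length = t2.length := by
    have := congrArg List.length hL
    simp at this
    omega
  exact (List.append_inj hL hlen).2

theorem pvSinCos_exclusive (f : String) (hcos : PySem.Str.endswith f "_cos" = true) :
    PySem.Str.endswith f "_sin" = false := by
  by_contra h
  rw [Bool.not_eq_false, pvEndswith_iff] at h
  rw [pvEndswith_iff] at hcos
  have := pvSuffix_eq_of_length _ _ _ h hcos (by decide)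
  simp at this

theorem pvGet?_foldl_insertV {β : Type} (V : String → β) :
    ∀ (l : List String) (d : PySem.Dict String β) (c : String),
      (l.foldl (fun d b => d.insert b (V b)) d).get? c
        = if c ∈ l then some (V c) else d.get? c := by
  intro l
  induction l with
  | nil => intro d c; simp
  | cons x xs ih =>
    intro d c
    rw [List.foldl_cons, ih]
    rw [PySem.Dict.get?_insert]
    by_cases hc : c ∈ xs
    · simp [hc]
    · by_cases hcx : c = x <;> simp [hc, hcx]

theorem pvGet?_dictOf {β : Type} (V : String → β) (bs : List String) (c : String) :
    (pvDictOf bs V).get? c = if c ∈ bs then some (V c) else none := by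
  unfold pvDictOf
  rw [pvGet?_foldl_insertV]
  simp

theorem pvContains_dictOf {β : Type} (V : String → β) (bs : List String) (c : String) :
    (pvDictOf bs V).contains c = decide (c ∈ bs) := by
  rw [PySem.Dict.contains_eq_isSome_get?, pvGet?_dictOf]
  by_cases hc : c ∈ bs <;> simp [hc]

theorem pvItems_dictOf {β : Type} (dflt : β) (V : String → β) (l : List String) :
    (pvDictOf l V).items = (PySem.Set.ofList l).map (fun b => (b, V b)) := by
  have hkeys : (pvDictOf l V).keys = PySem.Set.ofList l := by
    have := PySem.Dict.keys_foldl_insert l (fun _ x => V x) (PySem.Dict.empty (κ := String) (ν := β))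
    unfold pvDictOf
    rw [this, PySem.Dict.keys_empty, PySem.Set.update_nil_left]
  have hnodup : (pvDictOf l V).keys.Nodup := by
    rw [hkeys]; exact PySem.Set.nodup_ofList l
  rw [PySem.Dict.items_eq_map_keys _ hnodup dflt, hkeys]
  apply List.map_congr_left
  intro k hk
  rw [PySem.Dict.getD_eq_get?_getD, pvGet?_dictOf]
  have : k ∈ l := (PySem.Set.mem_ofList l k).mp hk
  simp [this]

theorem pvDictOf_congr {β : Type} (bs : List String) (V V' : String → β)
    (h : ∀ b ∈ bs, V b = V' b) : pvDictOf bs V = pvDictOf bs V' := by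
  unfold pvDictOf
  apply PySem.List.foldl_congr_mem
  intro acc x hx
  rw [h x hx]

theorem pvDictOf_append {β : Type} (bs : List String) (b : String) (V : String → β) :
    pvDictOf (bs ++ [b]) V = (pvDictOf bs V).insert b (V b) := by
  unfold pvDictOf
  rw [List.foldl_append]
  rfl

theorem pvDictOf_insert_mem {β : Type} (bs : List String) (V : String → β)
    (hnd : bs.Nodup) (b : String) (hb : b ∈ bs) (w : β) :
    (pvDictOf bs V).insert b w = pvDictOf bs (fun x => if x = b then w else V x) := by
  apply PySem.Dict.ext
  have hcont : (pvDictOf bs V).contains b = true := by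
    rw [pvContains_dictOf]; simpa using hb
  rw [PySem.Dict.items_insert_of_contains _ w hcont,
    pvItems_dictOf (V b) V bs, pvItems_dictOf (V b) _ bs,
    PySem.Set.ofList_eq_self_of_nodup bs hnd, List.map_map]
  apply List.map_congr_left
  intro x _
  by_cases hxb : x = b <;> simp [hxb]

-- PySem.Set.add in membership terms
theorem pvSet_add_of_mem (s : PySem.Set String) (x : String) (h : x ∈ s) :
    PySem.Set.add s x = s := by
  unfold PySem.Set.add
  simp [h]

theorem pvSet_add_of_not_mem (s : PySem.Set String) (x : String) (h : x ∉ s) :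
    PySem.Set.add s x = s ++ [x] := by
  unfold PySem.Set.add
  simp [h]

theorem pvSet_contains_eq (s : PySem.Set String) (x : String) :
    PySem.Set.contains s x = decide (x ∈ s) := by
  simp [PySem.Set.contains]

-- the single-pass loop of Source B computed in closed form
theorem pvBfold :
    ∀ (l : List String) (bs cs : List String), bs.Nodup →
      l.foldl pvStepB (pvDictOf bs (pvVf cs), cs)
        = (pvDictOf (PySem.Set.update bs (pvSinBases l)) (pvVf (PySem.Set.update cs (pvCosBases l))),
           PySem.Set.update cs (pvCosBases l)) := by
  intro l
  induction l with
  | nil => intro bs cs _; simp [pvSinBases, pvCosBases, PySem.Set.update]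
  | cons x xs ih =>
    intro bs cs hnd
    rw [List.foldl_cons]
    have hslice : PySem.Str.slice x none (some (-4)) = pvStrip x := rfl
    rcases Bool.eq_false_or_eq_true (PySem.Str.endswith x "_sin") with hsin | hsin
    · -- x is a sin feature
      have hsb : pvSinBases (x :: xs) = pvStrip x :: pvSinBases xs := by
        unfold pvSinBases
        rw [List.filter_cons_of_pos (p := fun f => PySem.Str.endswith f "_sin") (a := x)
          (l := xs) hsin, List.map_cons]
      have hcb : pvCosBases (x :: xs) = pvCosBases xs := by
        unfold pvCosBases
        rw [List.filter_cons_of_neg (p := fun f => !PySem.Str.endswith f "_sin" && PySem.Str.endswith f "_cos")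
          (a := x) (l := xs) (by simp only [hsin, Bool.not_true, Bool.false_and]; exact Bool.false_ne_true)]
      by_cases hmem : pvStrip x ∈ bs
      · have hstep : pvStepB (pvDictOf bs (pvVf cs), cs) x = (pvDictOf bs (pvVf cs), cs) := by
          unfold pvStepB
          rw [if_pos hsin]
          simp only [hslice, pvContains_dictOf]
          rw [if_pos (by simp [hmem])]
        rw [hstep, ih bs cs hnd, hsb, hcb]
        have : PySem.Set.update bs (pvStrip x :: pvSinBases xs)
            = PySem.Set.update (PySem.Set.add bs (pvStrip x)) (pvSinBases xs) := rfl
        rw [this, pvSet_add_of_mem bs _ hmem]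
      · have hx : x = pvStrip x ++ "_sin" := (pvStrip_append_suffix x "_sin" (by decide) hsin).symm
        have hstep : pvStepB (pvDictOf bs (pvVf cs), cs) x
            = (pvDictOf (bs ++ [pvStrip x]) (pvVf cs), cs) := by
          unfold pvStepB
          rw [if_pos hsin]
          simp only [hslice, pvContains_dictOf]
          rw [if_neg (by simp [hmem])]
          rw [pvDictOf_append]
          have hv : (if PySem.Set.contains cs (pvStrip x) then
                some [x, pvStrip x ++ "_cos"] else none)
              = pvVf cs (pvStrip x) := by
            unfold pvVf pvPair
            by_cases hc : PySem.Set.contains cs (pvStrip x) = true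
            · rw [if_pos hc, if_pos hc]
              exact congrArg (fun y => some [y, pvStrip x ++ "_cos"]) hx
            · rw [if_neg hc, if_neg hc]
          rw [hv]
        have hdisj : bs.Disjoint [pvStrip x] := by
          intro a ha hax
          rw [List.mem_singleton] at hax
          exact hmem (hax ▸ ha)
        rw [hstep, ih (bs ++ [pvStrip x]) cs (hnd.append (List.nodup_singleton _) hdisj), hsb, hcb]
        have : PySem.Set.update bs (pvStrip x :: pvSinBases xs)
            = PySem.Set.update (PySem.Set.add bs (pvStrip x)) (pvSinBases xs) := rfl
        rw [this, pvSet_add_of_not_mem bs _ hmem]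
    · rcases Bool.eq_false_or_eq_true (PySem.Str.endswith x "_cos") with hcos | hcos
      · -- x is a cos feature (and not a sin one)
        have hsb : pvSinBases (x :: xs) = pvSinBases xs := by
          unfold pvSinBases
          rw [List.filter_cons_of_neg (p := fun f => PySem.Str.endswith f "_sin") (a := x)
            (l := xs) (by simp only [hsin]; exact Bool.false_ne_true)]
        have hcb : pvCosBases (x :: xs) = pvStrip x :: pvCosBases xs := by
          unfold pvCosBases
          rw [List.filter_cons_of_pos (p := fun f => !PySem.Str.endswith f "_sin" && PySem.Str.endswith f "_cos")
            (a := x) (l := xs) (by simp only [hsin, hcos, Bool.not_false, Bool.true_and]), List.map_cons]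
        have hx : x = pvStrip x ++ "_cos" := (pvStrip_append_suffix x "_cos" (by decide) hcos).symm
        have hupd : PySem.Set.update cs (pvStrip x :: pvCosBases xs)
            = PySem.Set.update (PySem.Set.add cs (pvStrip x)) (pvCosBases xs) := rfl
        have hVagree_ne : ∀ b : String, b ≠ pvStrip x →
            pvVf cs b = pvVf (PySem.Set.add cs (pvStrip x)) b := by
          intro b hbx
          unfold pvVf
          rw [pvSet_contains_eq, pvSet_contains_eq]
          by_cases hbc : b ∈ cs
          · simp [hbc, PySem.Set.mem_add, hbx]
          · simp [hbc, PySem.Set.mem_add, hbx]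
        by_cases hpend : pvStrip x ∈ bs ∧ pvStrip x ∉ cs
        · -- the pending entry gets completed
          have hstep : pvStepB (pvDictOf bs (pvVf cs), cs) x
              = (pvDictOf bs (pvVf (PySem.Set.add cs (pvStrip x))), PySem.Set.add cs (pvStrip x)) := by
            unfold pvStepB
            rw [if_neg (by simp only [hsin]; exact Bool.false_ne_true), if_pos hcos]
            simp only [hslice]
            have hguard : (pvDictOf bs (pvVf cs)).get? (pvStrip x) = some none := by
              rw [pvGet?_dictOf, if_pos hpend.1]
              unfold pvVf
              rw [pvSet_contains_eq, if_neg (by simp [hpend.2])]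
            rw [if_pos hguard]
            have hins : (pvDictOf bs (pvVf cs)).insert (pvStrip x)
                  (some [pvStrip x ++ "_sin", x])
                = pvDictOf bs (pvVf (PySem.Set.add cs (pvStrip x))) := by
              rw [pvDictOf_insert_mem bs _ hnd _ hpend.1]
              apply pvDictOf_congr
              intro b hbmem
              by_cases hbx : b = pvStrip x
              · subst hbx
                rw [if_pos rfl]
                unfold pvVf pvPair
                rw [pvSet_contains_eq, if_pos (by simp [PySem.Set.mem_add]), ← hx]
              · rw [if_neg hbx]
                exact hVagree_ne b hbx
            rw [hins]
          rw [hstep, ih bs (PySem.Set.add cs (pvStrip x)) hnd, hsb, hcb, hupd]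
        · -- nothing pending for this base: only cos_seen grows
          have hside : pvStrip x ∉ bs ∨ pvStrip x ∈ cs := by
            by_cases h1 : pvStrip x ∈ bs
            · right
              by_contra h2
              exact hpend ⟨h1, h2⟩
            · left; exact h1
          have hstep : pvStepB (pvDictOf bs (pvVf cs), cs) x
              = (pvDictOf bs (pvVf cs), PySem.Set.add cs (pvStrip x)) := by
            unfold pvStepB
            rw [if_neg (by simp only [hsin]; exact Bool.false_ne_true), if_pos hcos]
            simp only [hslice]
            have hguard : ¬ ((pvDictOf bs (pvVf cs)).get? (pvStrip x) = some none) := by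
              rw [pvGet?_dictOf]
              rcases hside with h | h
              · rw [if_neg h]; simp
              · by_cases h1 : pvStrip x ∈ bs
                · rw [if_pos h1]
                  unfold pvVf
                  rw [pvSet_contains_eq, if_pos (by simp [h])]
                  simp
                · rw [if_neg h1]; simp
            rw [if_neg hguard]
          have hVagree : ∀ b ∈ bs, pvVf cs b = pvVf (PySem.Set.add cs (pvStrip x)) b := by
            intro b hbmem
            by_cases hbx : b = pvStrip x
            · subst hbx
              rcases hside with h | h
              · exact absurd hbmem h
              · rw [pvSet_add_of_mem cs _ h]
            · exact hVagree_ne b hbx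
          rw [hstep, pvDictOf_congr bs _ _ hVagree,
            ih bs (PySem.Set.add cs (pvStrip x)) hnd, hsb, hcb, hupd]
      · -- neither suffix: nothing happens
        have hsb : pvSinBases (x :: xs) = pvSinBases xs := by
          unfold pvSinBases
          rw [List.filter_cons_of_neg (p := fun f => PySem.Str.endswith f "_sin") (a := x)
            (l := xs) (by simp only [hsin]; exact Bool.false_ne_true)]
        have hcb : pvCosBases (x :: xs) = pvCosBases xs := by
          unfold pvCosBases
          rw [List.filter_cons_of_neg (p := fun f => !PySem.Str.endswith f "_sin" && PySem.Str.endswith f "_cos")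
            (a := x) (l := xs) (by simp only [hsin, hcos, Bool.not_false, Bool.true_and]; exact Bool.false_ne_true)]
        have hstep : pvStepB (pvDictOf bs (pvVf cs), cs) x = (pvDictOf bs (pvVf cs), cs) := by
          unfold pvStepB
          rw [if_neg (by simp only [hsin]; exact Bool.false_ne_true), if_neg (by simp only [hcos]; exact Bool.false_ne_true)]
        rw [hstep, ih bs cs hnd, hsb, hcb]

-- bases with a cos partner anywhere in fns
theorem pvMem_cosBases (fns : List String) (b : String) :
    b ∈ pvCosBases fns ↔ (b ++ "_cos") ∈ fns := by
  unfold pvCosBases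
  constructor
  · rintro h
    rw [List.mem_map] at h
    obtain ⟨f, hf, hstrip⟩ := h
    rw [List.mem_filter] at hf
    obtain ⟨hfm, hcond⟩ := hf
    rw [Bool.and_eq_true] at hcond
    have hcos : PySem.Str.endswith f "_cos" = true := hcond.2
    have := pvStrip_append_suffix f "_cos" (by decide) hcos
    rw [hstrip] at this
    rwa [this]
  · intro h
    rw [List.mem_map]
    refine ⟨b ++ "_cos", ?_, pvStrip_append b "_cos" (by decide)⟩
    rw [List.mem_filter]
    refine ⟨h, ?_⟩
    rw [pvSinCos_exclusive _ (pvEndswith_append b "_cos"), pvEndswith_append]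
    rfl

theorem pvOfList_filter_aux (p : String → Bool) :
    ∀ (l : List String) (s : List String),
      (l.filter p).foldl PySem.Set.add (s.filter p) = (l.foldl PySem.Set.add s).filter p := by
  intro l
  induction l with
  | nil => intro s; rfl
  | cons x xs ih =>
    intro s
    by_cases hx : p x = true
    · have hstep : PySem.Set.add (s.filter p) x = (PySem.Set.add s x).filter p := by
        unfold PySem.Set.add
        by_cases hm : x ∈ s
        · simp [hm, hx]
        · simp [hm, hx]
      rw [List.filter_cons_of_pos (by simp [hx]), List.foldl_cons, List.foldl_cons, hstep, ih]
    · simp at hx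
      have hstep : (PySem.Set.add s x).filter p = s.filter p := by
        unfold PySem.Set.add
        by_cases hm : x ∈ s
        · simp [hm]
        · simp [hm, hx]
      rw [List.filter_cons_of_neg (by simp [hx]), List.foldl_cons, ← hstep, ih]

theorem pvOfList_filter (p : String → Bool) (l : List String) :
    PySem.Set.ofList (l.filter p) = (PySem.Set.ofList l).filter p := by
  rw [PySem.Set.ofList_eq_foldl, PySem.Set.ofList_eq_foldl]
  have := pvOfList_filter_aux p l []
  simpa using this

theorem identify_cyclical_features_main (fns : List String) :
    identify_cyclical_features fns = identify_cyclical_features_alt fns := by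
  unfold identify_cyclical_features identify_cyclical_features_alt
  dsimp only
  have hsl : ∀ s : String, PySem.Str.slice s none (some (-4)) = pvStrip s := fun _ => rfl
  simp only [hsl]
  -- B side: the single pass in closed form
  have h0 : ((PySem.Dict.empty, PySem.Set.empty) :
      PySem.Dict String (Option (List String)) × PySem.Set String)
      = (pvDictOf [] (pvVf []), ([] : List String)) := rfl
  rw [h0, pvBfold fns [] [] List.nodup_nil]
  dsimp only
  rw [PySem.Set.update_nil_left, PySem.Set.update_nil_left]
  rw [pvItems_dictOf none, List.foldl_map]
  have hS0 := PySem.Set.nodup_ofList (pvSinBases fns)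
  rw [PySem.Set.ofList_eq_self_of_nodup _ hS0]
  -- the match on the stored value is an if on cos membership
  have hmatch :
      (PySem.Set.ofList (pvSinBases fns)).foldl
        (fun (d : PySem.Dict String (List String)) b =>
          match (b, pvVf (PySem.Set.ofList (pvCosBases fns)) b).2 with
          | some v => d.insert (b, pvVf (PySem.Set.ofList (pvCosBases fns)) b).1 v
          | none => d) PySem.Dict.empty
      = (PySem.Set.ofList (pvSinBases fns)).foldl
        (fun (d : PySem.Dict String (List String)) b =>
          if fns.contains (b ++ "_cos") then d.insert b (pvPair b) else d) PySem.Dict.empty := by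
    apply PySem.List.foldl_congr_mem
    intro acc b _
    unfold pvVf
    rw [pvSet_contains_eq]
    by_cases hb : b ∈ PySem.Set.ofList (pvCosBases fns)
    · have hmemc : (b ++ "_cos") ∈ fns :=
        (pvMem_cosBases fns b).mp ((PySem.Set.mem_ofList _ _).mp hb)
      rw [if_pos (by simp [hb])]
      simp [hmemc]
    · have hmemc : (b ++ "_cos") ∉ fns :=
        fun h => hb ((PySem.Set.mem_ofList _ _).mpr ((pvMem_cosBases fns b).mpr h))
      rw [if_neg (by simp [hb])]
      simp [hmemc]
  rw [hmatch]
  -- A side: rewrite each sin feature as base ++ "_sin"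
  have hcongrA :
      (fns.filter (fun f => PySem.Str.endswith f "_sin")).foldl
        (fun (cyclical_pairs : PySem.Dict String (List String)) sin_feature =>
          if fns.contains (pvStrip sin_feature ++ "_cos") then
            cyclical_pairs.insert (pvStrip sin_feature)
              [sin_feature, pvStrip sin_feature ++ "_cos"]
          else cyclical_pairs) PySem.Dict.empty
      = (fns.filter (fun f => PySem.Str.endswith f "_sin")).foldl
        (fun (cyclical_pairs : PySem.Dict String (List String)) sin_feature =>
          if fns.contains (pvStrip sin_feature ++ "_cos") then
            cyclical_pairs.insert (pvStrip sin_feature) (pvPair (pvStrip sin_feature))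
          else cyclical_pairs) PySem.Dict.empty := by
    apply PySem.List.foldl_congr_mem
    intro acc x hx
    have hx2 : PySem.Str.endswith x "_sin" = true := by
      have := (List.mem_filter.mp hx).2
      simpa using this
    show _ = if fns.contains (pvStrip x ++ "_cos") then
        acc.insert (pvStrip x) [pvStrip x ++ "_sin", pvStrip x ++ "_cos"] else acc
    rw [pvStrip_append_suffix x "_sin" (by decide) hx2]
  rw [hcongrA]
  have hmap := List.foldl_map (f := pvStrip)
    (g := fun (d : PySem.Dict String (List String)) b =>
      if fns.contains (b ++ "_cos") then d.insert b (pvPair b) else d)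
    (l := fns.filter (fun f => PySem.Str.endswith f "_sin")) (init := PySem.Dict.empty)
  rw [← hmap]
  rw [PySem.List.foldl_if_eq_foldl_filter, PySem.List.foldl_if_eq_foldl_filter]
  have hA := pvItems_dictOf ([] : List String) pvPair
    (((fns.filter (fun f => PySem.Str.endswith f "_sin")).map pvStrip).filter
      (fun b => fns.contains (b ++ "_cos")))
  unfold pvDictOf at hA
  rw [hA]
  have hB := pvItems_dictOf ([] : List String) pvPair
    ((PySem.Set.ofList (pvSinBases fns)).filter (fun b => fns.contains (b ++ "_cos")))
  unfold pvDictOf at hB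
  rw [hB]
  rw [PySem.Set.ofList_eq_self_of_nodup _ (List.Nodup.filter _ hS0)]
  rw [pvOfList_filter]
  unfold pvSinBases
  rfl

-- ===== VERDICT (by name: the statement is the Claim_ definition above) =====
theorem identify_cyclical_features_spec : Claim_equal_identify_cyclical_features := by
  intro fns _
  exact identify_cyclical_features_main fns
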